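-- pv_equiv track=rewrite | github.com/ah-academicians/All-python-Assignments | Hill cipher Cracker/Hill cipher cracker.py | findMultiplicativeInverse
-- ===== SOURCE A (Python) =====
-- def findMultiplicativeInverse(determinant):
--     multiplicative_inverse = -1
--     for i in range(26):
--         inverse = determinant * i
--         if inverse % 26 == 1:
--             multiplicative_inverse = i
--             break
--     return multiplicative_inverse
-- ===== SOURCE B (Python) =====
-- def findMultiplicativeInverse(determinant):
--     # extended Euclid on (determinant mod 26, 26), threading the Bezout coefficient
--     old_r, r = determinant % 26, 26
--     old_s, s = 1, 0
--     while r != 0: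
--         q = old_r // r
--         old_r, r = r, old_r - q * r
--         old_s, s = s, old_s - q * s
--     if old_r != 1:
--         return -1
--     return old_s % 26
-- ===== Notes on version B (the rewrite author's own statement) =====
-- stated objective: alternative
-- what changed: Replaced the brute-force scan over all residues 0..25 with the iterative extended Euclidean algorithm that computes the Bezout coefficient of determinant mod 26 directly and reduces it with % 26.
import Mathlib
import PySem

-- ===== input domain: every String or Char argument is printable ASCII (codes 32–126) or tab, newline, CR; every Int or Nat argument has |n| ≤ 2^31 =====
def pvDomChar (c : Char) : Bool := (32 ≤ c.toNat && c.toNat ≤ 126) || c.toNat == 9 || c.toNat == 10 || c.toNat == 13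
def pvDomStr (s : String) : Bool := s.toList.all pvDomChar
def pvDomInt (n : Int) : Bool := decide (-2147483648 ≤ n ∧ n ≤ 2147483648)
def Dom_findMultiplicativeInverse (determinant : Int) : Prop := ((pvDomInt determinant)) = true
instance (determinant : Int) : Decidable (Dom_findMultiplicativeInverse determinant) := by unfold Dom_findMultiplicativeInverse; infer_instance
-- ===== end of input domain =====

-- B replaces A's scan over all 26 residues by the extended Euclidean algorithm (alternative algorithm, same result).

-- ===== PORT A =====
-- the for-loop with break: first i in the list with determinant*i % 26 == 1, else -1
def findAuxA (determinant : Int) : List Int → Int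
  | [] => -1
  | i :: rest =>
      if PySem.Int.mod (determinant * i) 26 = 1 then i else findAuxA determinant rest

def findMultiplicativeInverse (determinant : Int) : Int :=
  findAuxA determinant (PySem.List.pyRange 0 26 1)

-- ===== PORT B =====
-- the while loop of Source B: (old_r, r, old_s, s) until r = 0; returns (old_r, old_s)
def egcdLoop (old_r r old_s s : Int) : Int × Int :=
  if h : r = 0 then (old_r, old_s)
  else
    let q := PySem.Int.floordiv old_r r
    egcdLoop r (old_r - q * r) s (old_s - q * s)
termination_by r.natAbs
decreasing_by
  have hm : PySem.Int.floordiv old_r r * r + PySem.Int.mod old_r r = old_r :=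
    PySem.Int.floordiv_mul_add_mod old_r r
  have heq : old_r - PySem.Int.floordiv old_r r * r = PySem.Int.mod old_r r := by omega
  rw [heq]
  rcases lt_or_gt_of_ne h with hneg | hpos
  · have := PySem.Int.mod_neg_bounds old_r hneg
    omega
  · have h1 := PySem.Int.mod_nonneg old_r hpos
    have h2 := PySem.Int.mod_lt old_r hpos
    omega

def findMultiplicativeInverse_alt (determinant : Int) : Int :=
  let p := egcdLoop (PySem.Int.mod determinant 26) 26 1 0
  if p.1 ≠ 1 then -1 else PySem.Int.mod p.2 26

-- ===== PRECONDITION & SPEC =====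
def Spec_findMultiplicativeInverse (determinant : Int) (out : Int) : Prop := out = findMultiplicativeInverse_alt determinant
instance (determinant : Int) (out : Int) : Decidable (Spec_findMultiplicativeInverse determinant out) := by unfold Spec_findMultiplicativeInverse; infer_instance

-- ===== CLAIM (what is proved, stated in full; the proofs are below) =====
def Claim_equal_findMultiplicativeInverse : Prop := ∀ (determinant : Int), Dom_findMultiplicativeInverse determinant → Spec_findMultiplicativeInverse determinant (findMultiplicativeInverse determinant)

-- ===== LEMMAS AND PROOFS =====

-- A's loop tests determinant only through determinant*i mod 26, so it only sees determinant mod 26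
lemma findAuxA_congr (determinant : Int) (l : List Int) :
    findAuxA determinant l = findAuxA (PySem.Int.mod determinant 26) l := by
  induction l with
  | nil => rfl
  | cons i rest ih =>
      have hmod : PySem.Int.mod (determinant * i) 26
          = PySem.Int.mod (PySem.Int.mod determinant 26 * i) 26 := by
        have h26 : (0:Int) < 26 := by norm_num
        simp only [PySem.Int.mod_eq_emod_of_pos h26]
        conv_lhs => rw [Int.mul_emod]
        conv_rhs => rw [Int.mul_emod, Int.emod_emod_of_dvd determinant (dvd_refl 26)]
      simp only [findAuxA, hmod, ih]

-- B only sees determinant mod 26 as well (mod is idempotent)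
lemma alt_congr (determinant : Int) :
    findMultiplicativeInverse_alt determinant
      = findMultiplicativeInverse_alt (PySem.Int.mod determinant 26) := by
  unfold findMultiplicativeInverse_alt
  have h26 : (0:Int) < 26 := by norm_num
  have h1 := PySem.Int.mod_nonneg determinant h26
  have h2 := PySem.Int.mod_lt determinant h26
  have : PySem.Int.mod (PySem.Int.mod determinant 26) 26 = PySem.Int.mod determinant 26 := by
    rw [PySem.Int.mod_eq_emod_of_pos h26]
    exact Int.emod_eq_of_lt h1 h2
  rw [this]

-- ===== VERDICT (by name: the statement is the Claim_ definition above) =====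
theorem findMultiplicativeInverse_spec : Claim_equal_findMultiplicativeInverse := by
  intro determinant _
  unfold Spec_findMultiplicativeInverse
  rw [show findMultiplicativeInverse determinant
        = findMultiplicativeInverse (PySem.Int.mod determinant 26) from
      findAuxA_congr determinant _, alt_congr determinant]
  have h26 : (0:Int) < 26 := by norm_num
  have h1 := PySem.Int.mod_nonneg determinant h26
  have h2 := PySem.Int.mod_lt determinant h26
  generalize PySem.Int.mod determinant 26 = r at h1 h2
  interval_cases r <;>
    · simp [findMultiplicativeInverse_alt, egcdLoop, PySem.Int.mod, PySem.Int.floordiv]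
      decide
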